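-- pv_equiv track=rewrite | github.com/AlgorithmOnline/su | 1014_기능개발.py | solution
-- ===== SOURCE A (Python) =====
-- import math
--
-- def solution(progresses, speeds):
--     stack=[]
--     result=[]
--
--     for i in range(len(progresses)):
--         cur=math.ceil((100-progresses[i])/speeds[i])
--
--         if i==0:
--             stack.append(cur)
--         else:
--             if stack[-1]>=cur:
--                 stack.append(cur)
--             else:
--                 result.append(len(stack))
--                 stack.clear()
--                 stack.append(cur)
--     result.append(len(stack))
--
--     return result
-- ===== SOURCE B (Python) =====
-- import math
--
-- def solution(progresses, speeds):
--     days = [math.ceil((100 - p) / s) for p, s in zip(progresses, speeds)]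
--
--     # Divide and conquer: split the days table in half, group each half,
--     # then merge: a group boundary falls exactly where a value strictly exceeds
--     # its predecessor, and such positions are local, so if the seam is an ascent
--     # the two group lists concatenate, otherwise the last left group fuses with
--     # the first right group.
--     def groups(ds):
--         if len(ds) == 1:
--             return [1]
--         mid = len(ds) // 2
--         a, b = ds[:mid], ds[mid:]
--         ga, gb = groups(a), groups(b)
--         if b[0] > a[-1]:
--             return ga + gb
--         ga[-1] += gb[0]
--         return ga + gb[1:]
--
--     return groups(days) if days else []
-- ===== Notes on version B (the rewrite author's own statement) =====
-- stated objective: alternative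
-- what changed: Replaces A's single index loop maintaining a stack and result list with a divide-and-conquer over the precomputed days table: split in half, group each half recursively, and merge at the seam (concatenate on an ascent, otherwise fuse the last left group with the first right group); correct because group boundaries are exactly the positions where days[i] > days[i-1], a purely local condition.
-- intended difference: On empty progresses A returns [0] (an artefact of appending len(stack) unconditionally after the loop), while B returns [], the intended answer when there are no features to deploy. — e.g. on solution([], []): A returns [0], B returns []
import Mathlib
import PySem

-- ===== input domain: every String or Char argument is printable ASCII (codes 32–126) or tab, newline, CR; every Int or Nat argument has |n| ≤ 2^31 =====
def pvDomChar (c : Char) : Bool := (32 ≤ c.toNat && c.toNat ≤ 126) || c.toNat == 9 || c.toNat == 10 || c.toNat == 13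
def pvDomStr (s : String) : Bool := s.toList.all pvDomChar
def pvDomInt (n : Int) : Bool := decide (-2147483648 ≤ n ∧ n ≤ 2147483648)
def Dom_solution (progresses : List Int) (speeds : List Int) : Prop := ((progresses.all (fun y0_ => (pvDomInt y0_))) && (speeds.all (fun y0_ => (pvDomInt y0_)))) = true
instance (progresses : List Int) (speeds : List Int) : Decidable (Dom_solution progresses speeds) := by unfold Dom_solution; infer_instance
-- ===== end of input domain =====

-- B replaces A's stack-maintaining index loop with a divide-and-conquer grouping of the
-- precomputed days table (split in half, group halves, merge at the seam); different algorithm, same result.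
-- B mutates only lists it builds itself; like A it leaves both arguments untouched.

-- math.ceil((100-p)/s) for ints: exact as -((p-100)//s) on the domain |int| ≤ 2^31
-- (the float quotient of 53-bit-exact operands rounds on a scale too fine to cross an integer here).
def pvCeilDiv (a b : Int) : Int := -(PySem.Int.floordiv (-a) b)

-- ===== PORT A =====
-- the loop body of A, verbatim
def pvStepA (P S : List Int) (sr : List Int × List Int) (i : Int) : List Int × List Int :=
  let cur := pvCeilDiv (100 - PySem.List.pyGetD P i 0) (PySem.List.pyGetD S i 0)
  if i == 0 then (sr.1 ++ [cur], sr.2)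
  else if cur ≤ PySem.List.pyGetD sr.1 (-1) 0 then (sr.1 ++ [cur], sr.2)
  else ([cur], sr.2 ++ [(sr.1.length : Int)])

def solution (progresses : List Int) (speeds : List Int) : List Int :=
  let sr := (PySem.List.pyRange 0 (progresses.length : Int) 1).foldl
    (pvStepA progresses speeds) ([], [])
  sr.2 ++ [(sr.1.length : Int)]

-- ===== PORT B =====
-- Source B's `groups`, with the list length as structural fuel (a totality guard only: each
-- recursive call is on a strictly shorter list, so the fuel never runs out on a reachable call).
-- ds[:mid]/ds[mid:] with 0 ≤ mid are exactly take/drop mid; len(ds)//2 on a Nat is Nat division;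
-- gb[1:] is exactly List.drop 1; a[-1], b[0], ga[-1], gb[0] are in-range Python indexings (pyGetD);
-- `ga[-1] += gb[0]; return ga + gb[1:]` is ga.dropLast ++ [ga[-1] + gb[0]] ++ gb.drop 1.
def pvGroupsDC : Nat → List Int → List Int
  | 0, _ => []
  | f + 1, ds =>
      if ds.length == 1 then [1]
      else
        let mid := ds.length / 2
        let a := ds.take mid
        let b := ds.drop mid
        let ga := pvGroupsDC f a
        let gb := pvGroupsDC f b
        if PySem.List.pyGetD a (-1) 0 < PySem.List.pyGetD b 0 0 then ga ++ gb
        else ga.dropLast ++ [PySem.List.pyGetD ga (-1) 0 + PySem.List.pyGetD gb 0 0] ++ gb.drop 1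

def solution_alt (progresses : List Int) (speeds : List Int) : List Int :=
  let days := (progresses.zip speeds).map (fun ps => pvCeilDiv (100 - ps.1) ps.2)
  if days.isEmpty then [] else pvGroupsDC days.length days

-- ===== PRECONDITION & SPEC =====
-- Pre_ excludes exactly the inputs where A raises: an i-th speed of 0 (ZeroDivisionError)
-- or fewer speeds than progresses (IndexError).
def Pre_solution (progresses : List Int) (speeds : List Int) : Prop :=
  progresses.length ≤ speeds.length ∧
  ∀ s ∈ speeds.take progresses.length, s ≠ 0

instance (progresses : List Int) (speeds : List Int) : Decidable (Pre_solution progresses speeds) := by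
  unfold Pre_solution; infer_instance

def pvWitness_solution : List Int × List Int := ([30, 55, 95, 99], [1, 30, 5, 10])

-- On empty progresses A returns [0] (an artefact of appending len(stack) unconditionally
-- after the loop), while B returns [], the intended answer when there are no features.
def D_solution (progresses : List Int) (speeds : List Int) : Prop := progresses = []
instance (progresses : List Int) (speeds : List Int) : Decidable (D_solution progresses speeds) := by
  unfold D_solution; infer_instance

def Spec_solution (progresses : List Int) (speeds : List Int) (out : List Int) : Prop :=
  ¬ D_solution progresses speeds → out = solution_alt progresses speeds
instance (progresses : List Int) (speeds : List Int) (out : List Int) : Decidable (Spec_solution progresses speeds out) := by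
  unfold Spec_solution; infer_instance

def pvDiffWitness_solution : List Int × List Int := ([], [])
def pvDiffWitnessOut_solution : (List Int) × (List Int) := ([0], [])

-- ===== CLAIM (what is proved, stated in full; the proofs are below) =====
def Claim_unchanged_solution : Prop := ∀ (progresses : List Int) (speeds : List Int),
  Dom_solution progresses speeds → Pre_solution progresses speeds →
  Spec_solution progresses speeds (solution progresses speeds)

def Claim_changed_solution : Prop :=
  Dom_solution (pvDiffWitness_solution.1) (pvDiffWitness_solution.2) ∧
  Pre_solution (pvDiffWitness_solution.1) (pvDiffWitness_solution.2) ∧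
  D_solution (pvDiffWitness_solution.1) (pvDiffWitness_solution.2) ∧
  solution (pvDiffWitness_solution.1) (pvDiffWitness_solution.2) = pvDiffWitnessOut_solution.1 ∧
  solution_alt (pvDiffWitness_solution.1) (pvDiffWitness_solution.2) = pvDiffWitnessOut_solution.2 ∧
  pvDiffWitnessOut_solution.1 ≠ pvDiffWitnessOut_solution.2

def Claim_exact_solution : Prop := ∀ (progresses : List Int) (speeds : List Int),
  Dom_solution progresses speeds → Pre_solution progresses speeds →
  D_solution progresses speeds → solution progresses speeds ≠ solution_alt progresses speeds

-- ===== LEMMAS AND PROOFS =====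

-- the i-th day value, as A computes it
def pvDay (P S : List Int) (i : Int) : Int :=
  pvCeilDiv (100 - PySem.List.pyGetD P i 0) (PySem.List.pyGetD S i 0)

-- run lengths of the grouping A's loop computes, recursively, from a previous value and open count
def pvGroups : Int → Int → List Int → List Int
  | _, count, [] => [count]
  | prev, count, d :: ds => if prev < d then count :: pvGroups d 1 ds else pvGroups d (count + 1) ds

-- the grouping of a whole (nonempty) list
def pvAbs : List Int → List Int
  | [] => []
  | d :: ds => pvGroups d 1 ds

theorem pvGroups_ne_nil (ds : List Int) : ∀ (prev count : Int), pvGroups prev count ds ≠ [] := by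
  induction ds with
  | nil => intro prev count; simp [pvGroups]
  | cons d ds ih =>
      intro prev count
      by_cases h : prev < d <;> simp [pvGroups, h, ih]

theorem pvGetLastD (l : List Int) (h : l ≠ []) (d : Int) : l.getLast h = l.getLastD d := by
  cases l with
  | nil => exact absurd rfl h
  | cons a t => rw [List.getLast_eq_getLastD, List.getLastD_cons]

theorem pvAbs_ne_nil (ds : List Int) (h : ds ≠ []) : pvAbs ds ≠ [] := by
  cases ds with
  | nil => exact absurd rfl h
  | cons d ds => exact pvGroups_ne_nil ds d 1

-- the open count shifts only the first emitted group size
theorem pvGroups_shift (ds : List Int) : ∀ (prev c k : Int),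
    pvGroups prev (c + k) ds = ((pvGroups prev c ds).headD 0 + k) :: (pvGroups prev c ds).tail := by
  induction ds with
  | nil => intro prev c k; simp [pvGroups]
  | cons d ds ih =>
      intro prev c k
      by_cases h : prev < d
      · simp [pvGroups, h]
      · simp only [pvGroups, if_neg h]
        rw [show c + k + 1 = (c + 1) + k by ring, ih d (c + 1) k]

-- group boundaries are local: grouping an append merges at the seam
theorem pvGroups_merge (xs : List Int) : ∀ (ys : List Int), ys ≠ [] → ∀ (prev count : Int),
    pvGroups prev count (xs ++ ys) =
      if xs.getLastD prev < ys.headD 0 then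
        pvGroups prev count xs ++ pvAbs ys
      else
        (pvGroups prev count xs).dropLast ++
          ((pvGroups prev count xs).getLastD 0 + (pvAbs ys).headD 0) :: (pvAbs ys).tail := by
  induction xs with
  | nil =>
      intro ys hys prev count
      cases ys with
      | nil => exact absurd rfl hys
      | cons y t =>
          by_cases h : prev < y
          · simp [pvGroups, pvAbs, h]
          · simp only [List.nil_append, pvGroups, if_neg h, List.getLastD_nil,
              List.headD_cons, pvAbs]
            rw [show count + 1 = 1 + count by ring, pvGroups_shift t y 1 count]
            simp [add_comm]
  | cons x xs ih =>
      intro ys hys prev count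
      by_cases h : prev < x
      · simp only [List.cons_append, pvGroups, if_pos h]
        rw [ih ys hys x 1]
        rw [List.getLastD_cons]
        by_cases hb : xs.getLastD x < ys.headD 0
        · simp only [if_pos hb]
        · simp only [if_neg hb]
          obtain ⟨g, G, hG⟩ : ∃ g G, pvGroups x 1 xs = g :: G := by
            cases hGx : pvGroups x 1 xs with
            | nil => exact absurd hGx (pvGroups_ne_nil xs x 1)
            | cons g G => exact ⟨g, G, rfl⟩
          simp [hG]
      · simp only [List.cons_append, pvGroups, if_neg h]
        rw [ih ys hys x (count + 1)]
        rw [List.getLastD_cons]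

-- the divide-and-conquer port computes the grouping, for any sufficient fuel
theorem pvGroupsDC_eq : ∀ (f : Nat) (ds : List Int), ds ≠ [] → ds.length ≤ f →
    pvGroupsDC f ds = pvAbs ds := by
  intro f
  induction f with
  | zero =>
      intro ds hne hlen
      cases ds with
      | nil => exact absurd rfl hne
      | cons d ds => simp at hlen
  | succ f ih =>
      intro ds hne hlen
      by_cases h1 : ds.length = 1
      · obtain ⟨d, rfl⟩ : ∃ d, ds = [d] := by
          cases ds with
          | nil => exact absurd rfl hne
          | cons d t =>
              cases t with
              | nil => exact ⟨d, rfl⟩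
              | cons e t => simp at h1
        simp [pvGroupsDC, pvAbs, pvGroups]
      · have h2 : 2 ≤ ds.length := by
          rcases ds with _ | ⟨d, _ | ⟨e, t⟩⟩
          · exact absurd rfl hne
          · simp at h1
          · simp only [List.length_cons]; omega
        have hmid1 : 1 ≤ ds.length / 2 := by omega
        have hmid2 : ds.length / 2 < ds.length := by omega
        have hane : ds.take (ds.length / 2) ≠ [] := by
          have : (ds.take (ds.length / 2)).length = ds.length / 2 := by
            simp; omega
          intro hc; rw [hc] at this; simp at this; omega
        have hbne : ds.drop (ds.length / 2) ≠ [] := by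
          have : (ds.drop (ds.length / 2)).length = ds.length - ds.length / 2 := by simp
          intro hc; rw [hc] at this; simp at this; omega
        have halen : (ds.take (ds.length / 2)).length ≤ f := by simp; omega
        have hblen : (ds.drop (ds.length / 2)).length ≤ f := by simp; omega
        have hds : ds.take (ds.length / 2) ++ ds.drop (ds.length / 2) = ds :=
          List.take_append_drop _ ds
        have hEq1 : (ds.length == 1) = false := by simp [h1]
        rw [pvGroupsDC, hEq1]
        simp only [Bool.false_eq_true, if_false]
        rw [ih _ hane halen, ih _ hbne hblen]
        rw [PySem.List.pyGetD_neg_one _ _ hane]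
        rw [PySem.List.pyGetD_zero]
        -- expand pvAbs (a ++ b) via the merge lemma
        obtain ⟨x, a', ha⟩ : ∃ x a', ds.take (ds.length / 2) = x :: a' := by
          cases h : ds.take (ds.length / 2) with
          | nil => exact absurd h hane
          | cons x a' => exact ⟨x, a', rfl⟩
        conv_rhs => rw [← hds, ha]
        rw [show pvAbs ((x :: a') ++ ds.drop (ds.length / 2))
              = pvGroups x 1 (a' ++ ds.drop (ds.length / 2)) from rfl]
        rw [pvGroups_merge a' _ hbne x 1]
        rw [show a'.getLastD x = (x :: a').getLastD x by rw [List.getLastD_cons]]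
        rw [← ha]
        rw [show (ds.take (ds.length / 2)).getLastD x
              = (ds.take (ds.length / 2)).getLast hane from (pvGetLastD _ hane x).symm]
        rw [show (ds.drop (ds.length / 2)).headD 0 = (ds.drop (ds.length / 2)).getD 0 0 by
          cases ds.drop (ds.length / 2) <;> simp]
        by_cases hc : (ds.take (ds.length / 2)).getLast hane < (ds.drop (ds.length / 2)).getD 0 0
        · rw [if_pos hc, if_pos hc, ha]
          simp [pvAbs]
        · rw [if_neg hc, if_neg hc, ha]
          rw [show pvAbs (x :: a') = pvGroups x 1 a' from rfl]
          obtain ⟨g, G, hG⟩ : ∃ g G, pvGroups x 1 a' = g :: G := by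
            cases hGx : pvGroups x 1 a' with
            | nil => exact absurd hGx (pvGroups_ne_nil a' x 1)
            | cons g G => exact ⟨g, G, rfl⟩
          obtain ⟨r, R, hR⟩ : ∃ r R, pvAbs (ds.drop (ds.length / 2)) = r :: R := by
            cases hRx : pvAbs (ds.drop (ds.length / 2)) with
            | nil => exact absurd hRx (pvAbs_ne_nil _ hbne)
            | cons r R => exact ⟨r, R, rfl⟩
          rw [hG, hR]
          rw [PySem.List.pyGetD_neg_one _ _ (by simp : g :: G ≠ [])]
          rw [PySem.List.pyGetD_zero]
          rw [pvGetLastD (g :: G) (by simp) 0]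
          simp

-- A's loop over indices i..i+k-1: the stack matters only through its last element and length
theorem pvLoopA (P S : List Int) (k : Nat) : ∀ (i : Int) (stack result : List Int) (top : Int),
    1 ≤ i →
    PySem.List.pyGetD stack (-1) 0 = top →
    (((PySem.List.pyRange i (i + (k : Int)) 1).foldl (pvStepA P S) (stack, result)).2
      ++ [((((PySem.List.pyRange i (i + (k : Int)) 1).foldl (pvStepA P S) (stack, result)).1).length : Int)])
    = result ++ pvGroups top (stack.length : Int)
        ((PySem.List.pyRange i (i + (k : Int)) 1).map (pvDay P S)) := by
  induction k with
  | zero =>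
      intro i stack result top hi htop
      rw [show i + ((0 : Nat) : Int) = i by simp]
      rw [PySem.List.pyRange_one_eq_nil (le_refl i)]
      simp [pvGroups]
  | succ k ih =>
      intro i stack result top hi htop
      have hlt : i < i + ((k + 1 : Nat) : Int) := by push_cast; omega
      rw [PySem.List.pyRange_one_cons hlt]
      have hend : i + ((k + 1 : Nat) : Int) = (i + 1) + (k : Int) := by push_cast; ring
      rw [hend]
      have hi0 : (i == 0) = false := by simp; omega
      simp only [List.foldl_cons, List.map_cons]
      rw [show pvStepA P S (stack, result) i =
        (if pvDay P S i ≤ top then (stack ++ [pvDay P S i], result)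
         else ([pvDay P S i], result ++ [(stack.length : Int)])) by
        simp [pvStepA, hi0, htop, pvDay]]
      by_cases h : pvDay P S i ≤ top
      · rw [if_pos h]
        have hnotlt : ¬ top < pvDay P S i := by omega
        rw [pvGroups, if_neg hnotlt]
        have hrec := ih (i + 1) (stack ++ [pvDay P S i]) result (pvDay P S i) (by omega)
          (PySem.List.pyGetD_neg_one_append_singleton stack (pvDay P S i) 0)
        rw [hrec]
        have hl : ((stack ++ [pvDay P S i]).length : Int) = (stack.length : Int) + 1 := by simp
        rw [hl]
      · rw [if_neg h]
        have hlt2 : top < pvDay P S i := by omega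
        rw [pvGroups, if_pos hlt2]
        have hrec := ih (i + 1) [pvDay P S i] (result ++ [(stack.length : Int)]) (pvDay P S i)
          (by omega) (by
            have := PySem.List.pyGetD_neg_one_append_singleton ([] : List Int) (pvDay P S i) 0
            simpa using this)
        rw [hrec]
        simp

-- under Pre_, B's days list is the index-map A effectively traverses
theorem pvDays_eq (P S : List Int) (hPre : Pre_solution P S) :
    (P.zip S).map (fun ps : Int × Int => pvCeilDiv (100 - ps.1) ps.2)
      = (PySem.List.pyRange 0 (P.length : Int) 1).map (pvDay P S) := by
  obtain ⟨hlen, _⟩ := hPre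
  apply List.ext_getElem
  · simp [PySem.List.length_pyRange_one]
    omega
  · intro i h1 h2
    have h1' : i < P.length ∧ i < S.length := by
      simp [List.length_zip] at h1; omega
    have hiP : i < P.length := h1'.1
    have hiS : i < S.length := h1'.2
    simp only [List.getElem_map, List.getElem_zip]
    rw [PySem.List.getElem_pyRange_one]
    rw [show (0 : Int) + (i : Int) = (i : Int) by ring]
    simp [pvDay, PySem.List.pyGetD_natCast, List.getD_eq_getElem?_getD,
      List.getElem?_eq_getElem hiP, List.getElem?_eq_getElem hiS]

-- ===== VERDICT (by name: the statement is the Claim_ definition above) =====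
theorem solution_spec : Claim_unchanged_solution := by
  intro P S _ hPre hND
  unfold solution solution_alt
  rw [pvDays_eq P S hPre]
  cases P with
  | nil => exact absurd rfl hND
  | cons p P' =>
      have hnnil : (PySem.List.pyRange 0 (((p :: P').length : Nat) : Int) 1).map
          (pvDay (p :: P') S) ≠ [] := by
        have : ((PySem.List.pyRange 0 (((p :: P').length : Nat) : Int) 1).map
            (pvDay (p :: P') S)).length = (p :: P').length := by
          simp [PySem.List.length_pyRange_one]
        intro hc; rw [hc] at this; simp at this
      rw [if_neg (by simpa [List.isEmpty_iff] using hnnil)]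
      rw [pvGroupsDC_eq _ _ hnnil (by simp [PySem.List.length_pyRange_one])]
      have hn : (0 : Int) < (((p :: P').length : Nat) : Int) := by
        simp only [List.length_cons]; push_cast; omega
      rw [PySem.List.pyRange_one_cons hn]
      simp only [List.foldl_cons, List.map_cons]
      rw [show pvStepA (p :: P') S ([], []) 0 = ([pvDay (p :: P') S 0], []) by
        simp [pvStepA, pvDay]]
      have hend : (((p :: P').length : Nat) : Int) = 1 + (P'.length : Int) := by
        simp only [List.length_cons]; push_cast; ring
      rw [show (0 : Int) + 1 = 1 by ring]
      rw [hend]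
      have hA := pvLoopA (p :: P') S P'.length 1 [pvDay (p :: P') S 0] [] (pvDay (p :: P') S 0)
        (le_refl 1)
        (by
          have := PySem.List.pyGetD_neg_one_append_singleton ([] : List Int) (pvDay (p :: P') S 0) 0
          simpa using this)
      rw [hA]
      simp [pvAbs]

theorem solution_changed : Claim_changed_solution := by
  unfold Claim_changed_solution; decide

theorem solution_tight : Claim_exact_solution := by
  intro P S _ _ hD
  unfold D_solution at hD
  subst hD
  simp [solution, solution_alt]
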